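-- pv_equiv track=rewrite | github.com/DPNT-Sourcecode/CHK-ivgj01 | lib/solutions/CHK/checkout_solution.py | apply_group_discount
-- ===== SOURCE A (Python) =====
-- def apply_group_discount(counts, prices):
--     group_skus = ['S','T','X','Y','Z']
--     group_price=45
--     group_size=3
--     group_items=[]
--     for sku in group_skus:
--         group_items+=[sku]*counts.get(sku,0)
--
--     group_items.sort(key=lambda sku: prices[sku], reverse=True)
--
--     num_groups = len(group_items)//group_size
--     total=num_groups*group_price
--
--     for i in range(num_groups*group_size):
--         counts[group_items[i]]-=1
--
--     return total,counts
-- ===== SOURCE B (Python) =====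
-- def apply_group_discount(counts, prices):
--     group_skus = ['S', 'T', 'X', 'Y', 'Z']
--     avail = {s: max(counts.get(s, 0), 0) for s in group_skus}
--     order = sorted(group_skus, key=lambda s: prices.get(s, 0), reverse=True)
--     n = sum(avail.values())
--     num_groups = n // 3
--     remaining = num_groups * 3
--     for s in order:
--         use = min(avail[s], remaining)
--         if use:
--             counts[s] -= use
--         remaining -= use
--     return num_groups * 45, counts
-- ===== Notes on version B (the rewrite author's own statement) =====
-- stated objective: alternative
-- what changed: Instead of expanding counts into one list element per item, sorting that expanded list and decrementing item by item, B sorts only the 5 fixed SKUs by price and consumes the counts arithmetically with a greedy budget; it trades the per-item loop for constant-size SKU arithmetic (not measurably faster on the generated inputs, whose group counts stay small).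
import Mathlib
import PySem

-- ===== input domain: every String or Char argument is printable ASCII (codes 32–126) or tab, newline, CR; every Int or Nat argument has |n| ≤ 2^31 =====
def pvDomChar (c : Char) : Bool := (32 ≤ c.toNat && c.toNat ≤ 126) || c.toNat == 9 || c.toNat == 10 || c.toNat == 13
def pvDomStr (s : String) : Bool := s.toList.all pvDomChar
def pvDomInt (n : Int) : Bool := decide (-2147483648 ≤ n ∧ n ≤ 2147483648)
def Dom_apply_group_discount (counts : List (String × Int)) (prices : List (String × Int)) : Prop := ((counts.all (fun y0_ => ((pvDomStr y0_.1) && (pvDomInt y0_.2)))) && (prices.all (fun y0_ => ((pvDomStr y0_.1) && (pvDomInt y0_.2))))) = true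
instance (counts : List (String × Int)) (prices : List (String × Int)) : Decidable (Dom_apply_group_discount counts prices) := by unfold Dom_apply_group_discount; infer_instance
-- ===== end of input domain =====

-- B replaces A's expansion of counts into one list element per item (sorted and consumed
-- item by item) by an arithmetic greedy pass over the 5 SKUs sorted by price: a different
-- algorithm whose work over the group items is constant-size SKU arithmetic. Both Pythons
-- mutate `counts` in place identically; the equivalence proved is about the returned pair.

-- ===== PORT A =====
def apply_group_discount (counts : List (String × Int)) (prices : List (String × Int)) : Int × (List (String × Int)) :=
  let cd := PySem.Dict.ofList counts
  let pd := PySem.Dict.ofList prices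
  let group_skus : List String := ["S", "T", "X", "Y", "Z"]
  let group_price : Int := 45
  let group_size : Int := 3
  let group_items : List String :=
    group_skus.foldl (fun acc sku => acc ++ PySem.List.pyRepeat [sku] (cd.getD sku 0)) []
  -- sort key `prices[sku]`: Pre_ guarantees every sku occurring in group_items is in prices,
  -- so the total `pd.getD sku 0` is exact there
  let group_items := PySem.List.sorted group_items (fun sku => pd.getD sku 0) true
  let num_groups := PySem.Int.floordiv (group_items.length : Int) group_size
  let total := num_groups * group_price
  -- `counts[group_items[i]] -= 1`: every key reached came from counts itself, so
  -- `modify` (which would insert a missing key) is exact on all reachable states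
  let cd := (PySem.List.pyRange 0 (num_groups * group_size) 1).foldl
      (fun d i => d.modify (PySem.List.pyGetD group_items i "") 0 (· - 1)) cd
  (total, cd.items)

-- ===== PORT B =====
def apply_group_discount_alt (counts : List (String × Int)) (prices : List (String × Int)) : Int × (List (String × Int)) :=
  let cd := PySem.Dict.ofList counts
  let pd := PySem.Dict.ofList prices
  let group_skus : List String := ["S", "T", "X", "Y", "Z"]
  let avail := PySem.Dict.ofList (group_skus.map (fun s => (s, max (cd.getD s 0) 0)))
  let order := PySem.List.sorted group_skus (fun s => pd.getD s 0) true
  let n := avail.values.sum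
  let num_groups := PySem.Int.floordiv n 3
  -- `counts[s] -= use` only runs with use > 0, hence with s present in counts: modify is exact
  let st := order.foldl (fun st s =>
      let use := min (avail.getD s 0) st.2
      (if use ≠ 0 then st.1.modify s 0 (· - use) else st.1, st.2 - use))
      (cd, num_groups * 3)
  (num_groups * 45, st.1.items)

-- ===== PRECONDITION & SPEC =====
-- Pre_ excludes exactly the inputs where Python A raises KeyError: a group SKU with a
-- positive count but no entry in prices (its sort key `prices[sku]` is evaluated).
def Pre_apply_group_discount (counts : List (String × Int)) (prices : List (String × Int)) : Prop :=
  ∀ s ∈ (["S", "T", "X", "Y", "Z"] : List String),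
    0 < (PySem.Dict.ofList counts).getD s 0 → (PySem.Dict.ofList prices).contains s = true
instance (counts : List (String × Int)) (prices : List (String × Int)) : Decidable (Pre_apply_group_discount counts prices) := by unfold Pre_apply_group_discount; infer_instance

def pvWitness_apply_group_discount : (List (String × Int)) × (List (String × Int)) :=
  ([("S", 2), ("X", 4), ("A", 1)], [("S", 10), ("X", 7)])

def Spec_apply_group_discount (counts : List (String × Int)) (prices : List (String × Int)) (out : Int × (List (String × Int))) : Prop := out = apply_group_discount_alt counts prices
instance (counts : List (String × Int)) (prices : List (String × Int)) (out : Int × (List (String × Int))) : Decidable (Spec_apply_group_discount counts prices out) := by unfold Spec_apply_group_discount; infer_instance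

-- ===== CLAIM (what is proved, stated in full; the proofs are below) =====
def Claim_equal_apply_group_discount : Prop := ∀ (counts : List (String × Int)) (prices : List (String × Int)), Dom_apply_group_discount counts prices → Pre_apply_group_discount counts prices → Spec_apply_group_discount counts prices (apply_group_discount counts prices)

-- ===== LEMMAS AND PROOFS =====

theorem pv_insertBy_eq_takeWhile {α : Type} (before : α → α → Bool) (x : α) (ys : List α) :
    PySem.List.insertBy before x ys
      = ys.takeWhile (fun y => !before x y) ++ x :: ys.dropWhile (fun y => !before x y) := by
  induction ys with
  | nil => simp [PySem.List.insertBy]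
  | cons y t ih =>
    by_cases h : before x y
    · simp [PySem.List.insertBy, h]
    · simp only [PySem.List.insertBy, h, if_neg, Bool.false_eq_true, not_false_iff]
      simp [h, ih]

theorem pv_takeWhile_dropWhile {α : Type} (P : α → Bool) (l : List α) :
    (l.dropWhile P).takeWhile P = [] := by
  cases h : l.dropWhile P with
  | nil => rfl
  | cons d D =>
    have := List.head?_dropWhile_not P l
    rw [h] at this
    simp only [List.head?_cons] at this
    simp [this]

theorem pv_dropWhile_dropWhile {α : Type} (P : α → Bool) (l : List α) :
    (l.dropWhile P).dropWhile P = l.dropWhile P := by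
  cases h : l.dropWhile P with
  | nil => rfl
  | cons d D =>
    have := List.head?_dropWhile_not P l
    rw [h] at this
    simp only [List.head?_cons] at this
    simp [this]

theorem pv_takeWhile_append_all {α : Type} (P : α → Bool) (l t : List α)
    (h : ∀ y ∈ l, P y = true) : (l ++ t).takeWhile P = l ++ t.takeWhile P := by
  induction l with
  | nil => rfl
  | cons a l ih =>
    simp only [List.cons_append, List.takeWhile_cons, h a (by simp)]
    simp [ih (fun y hy => h y (by simp [hy]))]

theorem pv_dropWhile_append_all {α : Type} (P : α → Bool) (l t : List α)
    (h : ∀ y ∈ l, P y = true) : (l ++ t).dropWhile P = t.dropWhile P := by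
  induction l with
  | nil => rfl
  | cons a l ih =>
    simp only [List.cons_append, List.dropWhile_cons, h a (by simp)]
    simp [ih (fun y hy => h y (by simp [hy]))]

theorem pv_foldl_insertBy_replicate {α : Type} (before : α → α → Bool) (x : α)
    (hxx : before x x = false) (n : Nat) (ys : List α) :
    (List.replicate n x).foldl (fun acc z => PySem.List.insertBy before z acc) ys
      = ys.takeWhile (fun y => !before x y) ++ List.replicate n x
          ++ ys.dropWhile (fun y => !before x y) := by
  induction n generalizing ys with
  | zero => simp
  | succ n ih =>
    set P : α → Bool := fun y => !before x y with hP
    have hPx : P x = true := by simp [hP, hxx]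
    have hT : ∀ y ∈ ys.takeWhile P, P y = true := fun y hy => List.mem_takeWhile_imp hy
    rw [List.replicate_succ, List.foldl_cons, ih (PySem.List.insertBy before x ys),
        pv_insertBy_eq_takeWhile]
    rw [show (ys.takeWhile P ++ x :: ys.dropWhile P) = (ys.takeWhile P ++ [x]) ++ ys.dropWhile P by simp]
    rw [pv_takeWhile_append_all P _ _ (by intro y hy; rcases List.mem_append.mp hy with h' | h'
                                          · exact hT y h'
                                          · simp at h'; subst h'; exact hPx),
        pv_dropWhile_append_all P _ _ (by intro y hy; rcases List.mem_append.mp hy with h' | h'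
                                          · exact hT y h'
                                          · simp at h'; subst h'; exact hPx)]
    rw [pv_takeWhile_dropWhile, pv_dropWhile_dropWhile]
    simp

theorem pv_takeWhile_none {α : Type} (P : α → Bool) (l : List α)
    (h : ∀ y ∈ l, P y = false) : l.takeWhile P = [] ∧ l.dropWhile P = l := by
  cases l with
  | nil => simp
  | cons a t => simp [h a (by simp)]

-- placeholders for already-proved helpers

theorem pv_insertBy_flatMap {α κ : Type} [LinearOrder κ] (key : α → κ) (c : α → Nat)
    (x : α) (B : List α) (hB : B.Pairwise (fun a b => key b ≤ key a)) :
    (PySem.List.insertBy (fun a b => decide (key b < key a)) x B).flatMap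
        (fun s => List.replicate (c s) s)
      = (B.flatMap (fun s => List.replicate (c s) s)).takeWhile
            (fun y => !(decide (key y < key x) : Bool))
          ++ List.replicate (c x) x
          ++ (B.flatMap (fun s => List.replicate (c s) s)).dropWhile
            (fun y => !(decide (key y < key x) : Bool)) := by
  set P : α → Bool := fun y => !(decide (key y < key x) : Bool) with hP
  induction B with
  | nil => simp [PySem.List.insertBy]
  | cons b B ih =>
    have hpw := (List.pairwise_cons.mp hB).1
    have htail := (List.pairwise_cons.mp hB).2
    by_cases h : key b < key x
    · -- insert in front of b's block
      have hfalse : ∀ y ∈ (List.replicate (c b) b ++ B.flatMap (fun s => List.replicate (c s) s)),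
          P y = false := by
        intro y hy
        rcases List.mem_append.mp hy with h' | h'
        · have := List.eq_of_mem_replicate h'; subst this; simp [hP, h]
        · rcases List.mem_flatMap.mp h' with ⟨b', hb', hy'⟩
          have := List.eq_of_mem_replicate hy'; subst this
          have : key y ≤ key b := hpw y hb'
          simp [hP, lt_of_le_of_lt this h]
      obtain ⟨ht, hd⟩ := pv_takeWhile_none P _ hfalse
      simp only [PySem.List.insertBy, decide_eq_true_eq, if_pos h]
      simp only [List.flatMap_cons]
      rw [show (List.replicate (c b) b ++ B.flatMap fun s => List.replicate (c s) s).takeWhile P = [] from ht,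
          show (List.replicate (c b) b ++ B.flatMap fun s => List.replicate (c s) s).dropWhile P = _ from hd]
      simp
    · -- b stays in front
      have hb : P b = true := by simp [hP, h]
      have hrepl : ∀ y ∈ List.replicate (c b) b, P y = true := by
        intro y hy; have := List.eq_of_mem_replicate hy; subst this; exact hb
      simp only [PySem.List.insertBy, decide_eq_true_eq, if_neg h]
      simp only [List.flatMap_cons]
      rw [pv_takeWhile_append_all P _ _ hrepl, pv_dropWhile_append_all P _ _ hrepl,
          ih htail]
      simp

theorem pv_sorted_flatMap_aux {α κ : Type} [LinearOrder κ] (key : α → κ) (c : α → Nat)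
    (xs : List α) : ∀ ys : List α,
    (xs.flatMap (fun s => List.replicate (c s) s)).foldl
        (fun acc z => PySem.List.insertBy (fun a b => decide (key b < key a)) z acc)
        ((PySem.List.sorted ys key true).flatMap (fun s => List.replicate (c s) s))
      = (PySem.List.sorted (ys ++ xs) key true).flatMap (fun s => List.replicate (c s) s) := by
  induction xs with
  | nil => intro ys; simp
  | cons x xs ih =>
    intro ys
    have hins : PySem.List.insertBy (fun a b => decide (key b < key a)) x
        (PySem.List.sorted ys key true) = PySem.List.sorted (ys ++ [x]) key true := by
      rw [PySem.List.sorted_rev_eq_foldl_insertBy, PySem.List.sorted_rev_eq_foldl_insertBy,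
          List.foldl_append]
      rfl
    rw [List.flatMap_cons, List.foldl_append,
        pv_foldl_insertBy_replicate _ x (by simp) (c x),
        ← pv_insertBy_flatMap key c x _ (PySem.List.sorted_pairwise_rev ys key),
        hins, ih (ys ++ [x])]
    simp

theorem pv_sorted_flatMap {α κ : Type} [LinearOrder κ] (key : α → κ) (c : α → Nat)
    (xs : List α) :
    PySem.List.sorted (xs.flatMap (fun s => List.replicate (c s) s)) key true
      = (PySem.List.sorted xs key true).flatMap (fun s => List.replicate (c s) s) := by
  have := pv_sorted_flatMap_aux key c xs []
  simpa [PySem.List.sorted_rev_eq_foldl_insertBy] using this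

theorem pv_foldl_modify_replicate (s : String) (u : Nat) (d : PySem.Dict String Int) :
    (List.replicate u s).foldl (fun d x => d.modify x 0 (· - 1)) d
      = if u = 0 then d else d.modify s 0 (· - (u : Int)) := by
  induction u generalizing d with
  | zero => simp
  | succ u ih =>
    rw [List.replicate_succ, List.foldl_cons, ih]
    by_cases hu : u = 0
    · subst hu; simp
    · simp only [hu, Nat.succ_ne_zero, ite_false]
      simp only [PySem.Dict.modify]
      rw [PySem.Dict.getD_insert_self, PySem.Dict.insert_insert_self]
      congr 1
      push_cast
      ring

theorem pv_foldl_pyRange_take {α β : Type} (xs : List α) (dflt : α) (f : β → α → β)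
    (init : β) (k : Nat) (hk : k ≤ xs.length) :
    (PySem.List.pyRange 0 (k : Int) 1).foldl
        (fun acc i => f acc (PySem.List.pyGetD xs i dflt)) init
      = (xs.take k).foldl f init := by
  have hlen : ((xs.take k).length : Int) = (k : Int) := by simp [List.length_take, Nat.min_eq_left hk]
  rw [← PySem.List.foldl_pyRange_zero_pyGetD' (xs.take k) dflt f init, hlen]
  apply PySem.List.foldl_congr_mem
  intro acc i hi
  have h0 : 0 ≤ i ∧ i < (k : Int) := PySem.List.mem_pyRange_one.mp hi
  have h1 : i < ((xs.take k).length : Int) := by rw [hlen]; exact h0.2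
  have h2 : i < (xs.length : Int) := by
    have : (k : Int) ≤ (xs.length : Int) := by exact_mod_cast hk
    omega
  rw [PySem.List.pyGetD_eq_getElem _ dflt h0.1 h1, PySem.List.pyGetD_eq_getElem _ dflt h0.1 h2,
      List.getElem_take]

theorem pv_take_foldl_eq_greedy (m : String → Int) (hm : ∀ s, 0 ≤ m s)
    (S : List String) (d : PySem.Dict String Int) (k : Int) (hk : 0 ≤ k)
    (hlen : k ≤ ((S.flatMap (fun s => List.replicate (m s).toNat s)).length : Int)) :
    ((S.flatMap (fun s => List.replicate (m s).toNat s)).take k.toNat).foldl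
        (fun d x => d.modify x 0 (· - 1)) d
      = (S.foldl (fun st s =>
            let use := min (m s) st.2
            (if use ≠ 0 then st.1.modify s 0 (· - use) else st.1, st.2 - use)) (d, k)).1 := by
  induction S generalizing d k with
  | nil =>
    simp only [List.flatMap_nil, List.length_nil, Nat.cast_zero] at hlen
    have : k = 0 := le_antisymm hlen hk
    subst this; simp
  | cons s S ih =>
    have hms := hm s
    set a : Nat := (m s).toNat with ha
    set use : Int := min (m s) k with huse
    have huse0 : 0 ≤ use := le_min hms hk
    have husek : use ≤ k := min_le_right _ _
    have hu : use.toNat = min k.toNat a := by omega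
    simp only [List.flatMap_cons, List.take_append, List.take_replicate, List.foldl_append]
    rw [List.length_replicate, pv_foldl_modify_replicate]
    simp only [List.flatMap_cons, List.length_append, List.length_replicate] at hlen
    have hrest : k - use ≤ ((S.flatMap (fun s => List.replicate (m s).toNat s)).length : Int) := by
      push_cast at hlen ⊢
      omega
    have htake : k.toNat - a = (k - use).toNat := by omega
    have hD : (if min k.toNat a = 0 then d else d.modify s 0 (· - ((min k.toNat a : Nat) : Int)))
        = (if use ≠ 0 then d.modify s 0 (· - use) else d) := by
      rw [← hu]
      by_cases h0 : use = 0
      · simp [h0]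
      · have h1 : use.toNat ≠ 0 := by omega
        simp only [h1, h0, ne_eq, not_false_iff, if_neg, if_pos]
        rw [Int.toNat_of_nonneg huse0]
    rw [htake, hD, ih _ (k - use) (by omega) hrest, List.foldl_cons]

theorem pv_avail_items (m : String → Int) :
    (PySem.Dict.ofList ((["S", "T", "X", "Y", "Z"] : List String).map (fun s => (s, m s)))).items
      = (["S", "T", "X", "Y", "Z"] : List String).map (fun s => (s, m s)) := by
  show (PySem.Dict.empty.update _).items = _
  unfold PySem.Dict.update
  have := PySem.Dict.items_foldl_insert_fresh
      ((["S", "T", "X", "Y", "Z"] : List String).map (fun s => (s, m s)))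
      Prod.fst Prod.snd PySem.Dict.empty
      (by intro a _; exact PySem.Dict.contains_empty _)
      (by simp)
  simpa using this

theorem pv_avail_getD (m : String → Int) (s : String)
    (hs : s ∈ (["S", "T", "X", "Y", "Z"] : List String)) :
    (PySem.Dict.ofList ((["S", "T", "X", "Y", "Z"] : List String).map (fun s => (s, m s)))).getD s 0
      = m s := by
  apply PySem.Dict.getD_of_mem_items
  · rw [pv_avail_items]
    exact List.mem_map.mpr ⟨s, hs, rfl⟩
  · exact PySem.Dict.nodup_keys_ofList _

theorem pv_sum_toNat_cast (m : String → Int) (hm : ∀ s, 0 ≤ m s) (l : List String) :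
    (((l.map (fun s => (m s).toNat)).sum : Nat) : Int) = (l.map m).sum := by
  induction l with
  | nil => simp
  | cons a l ih =>
    simp only [List.map_cons, List.sum_cons, Nat.cast_add, Int.toNat_of_nonneg (hm a), ih]

theorem pv_ports_eq (counts prices : List (String × Int)) :
    apply_group_discount counts prices = apply_group_discount_alt counts prices := by
  unfold apply_group_discount apply_group_discount_alt
  simp only [PySem.List.pyRepeat_singleton]
  set cd := PySem.Dict.ofList counts with hcd
  set pd := PySem.Dict.ofList prices with hpd
  set key : String → Int := fun s => pd.getD s 0 with hkey
  set m : String → Int := fun s => max (cd.getD s 0) 0 with hmdef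
  have hm : ∀ s, 0 ≤ m s := fun s => le_max_right _ _
  set skus : List String := ["S", "T", "X", "Y", "Z"] with hskus
  set S := PySem.List.sorted skus key true with hS
  -- the expanded item list
  have htoNat : ∀ s : String, (cd.getD s 0).toNat = (m s).toNat := by
    intro s; simp only [hmdef]; omega
  have hGI : skus.foldl (fun acc sku => acc ++ List.replicate (cd.getD sku 0).toNat sku) []
      = skus.flatMap (fun s => List.replicate (m s).toNat s) := by
    rw [PySem.List.foldl_append_eq_flatMap]
    simp only [htoNat, List.nil_append]
  rw [hGI, pv_sorted_flatMap key (fun s => (m s).toNat) skus, ← hS]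
  -- the item count
  have hlen : (((S.flatMap (fun s => List.replicate (m s).toNat s)).length : Nat) : Int)
      = (skus.map m).sum := by
    have hperm : (S.map (fun s => (m s).toNat)).Perm (skus.map (fun s => (m s).toNat)) :=
      (PySem.List.sorted_perm skus key true).map _
    calc (((S.flatMap (fun s => List.replicate (m s).toNat s)).length : Nat) : Int)
        = (((S.map (fun s => (m s).toNat)).sum : Nat) : Int) := by
          rw [List.length_flatMap]; simp
      _ = (((skus.map (fun s => (m s).toNat)).sum : Nat) : Int) := by rw [hperm.sum_eq]
      _ = (skus.map m).sum := pv_sum_toNat_cast m hm skus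
  have hvals : (PySem.Dict.ofList (skus.map (fun s => (s, m s)))).values.sum = (skus.map m).sum := by
    simp only [PySem.Dict.values]
    rfl
  rw [hvals, hlen]
  set n := (skus.map m).sum with hn
  set g := PySem.Int.floordiv n 3 with hg
  have h3 : (0:Int) < 3 := by norm_num
  have hgediv : g = n / 3 := by rw [hg, PySem.Int.floordiv_eq_ediv_of_pos h3]
  have hn0 : 0 ≤ n := by
    apply List.sum_nonneg
    intro x hx
    rcases List.mem_map.mp hx with ⟨s, _, rfl⟩
    exact hm s
  have hk0 : 0 ≤ g * 3 := by
    have := Int.ediv_nonneg hn0 (by norm_num : (0:Int) ≤ 3)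
    rw [hgediv]; positivity
  have hkn : g * 3 ≤ n := by
    have hmod := Int.emod_nonneg n (by norm_num : (3:Int) ≠ 0)
    have hdiv := Int.mul_ediv_add_emod n 3
    rw [hgediv]; omega
  have hklen : (g * 3).toNat ≤ (S.flatMap (fun s => List.replicate (m s).toNat s)).length := by
    omega
  rw [show (g * 3) = (((g * 3).toNat : Nat) : Int) by omega]
  rw [pv_foldl_pyRange_take _ "" (fun d x => d.modify x 0 (· - 1)) cd _ hklen]
  rw [show ((((g * 3).toNat : Nat) : Int)) = g * 3 by omega]
  rw [pv_take_foldl_eq_greedy m hm S cd (g * 3) hk0 (by omega)]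
  have hbody : S.foldl (fun st s =>
        let use := min ((PySem.Dict.ofList (skus.map (fun s => (s, m s)))).getD s 0) st.2
        (if use ≠ 0 then st.1.modify s 0 (· - use) else st.1, st.2 - use)) (cd, g * 3)
      = S.foldl (fun st s =>
        let use := min (m s) st.2
        (if use ≠ 0 then st.1.modify s 0 (· - use) else st.1, st.2 - use)) (cd, g * 3) := by
    apply PySem.List.foldl_congr_mem
    intro acc s hs
    rw [pv_avail_getD m s ((PySem.List.mem_sorted skus key true s).mp hs)]
  rw [hbody]

-- ===== VERDICT (by name: the statement is the Claim_ definition above) =====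
theorem apply_group_discount_spec : Claim_equal_apply_group_discount := by
  intro counts prices _ _
  unfold Spec_apply_group_discount
  exact pv_ports_eq counts prices
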